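-- pv_equiv track=rewrite | github.com/raga-rob/JPEGtoDNA | dna_to_jpeg.py | quads_from_dna_rotating
-- ===== SOURCE A (Python) =====
-- ROT_TABLE = [
--     ['A', 'C', 'G', 'T'],
--     ['C', 'G', 'T', 'A'],
--     ['G', 'T', 'A', 'C'],
--     ['T', 'A', 'C', 'G'],
-- ]
--
-- def quads_from_dna_rotating(dna, map_period, map_seed):
--     rev_maps = []
--     for m in ROT_TABLE:
--         rev = { m[d]: d for d in range(4) }
--         rev_maps.append(rev)
--
--     period = max(1, map_period)
--     quads = []
--     for i, base in enumerate(dna):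
--         rot_index = (map_seed + i) % period
--         rot_index = rot_index % 4
--         q = rev_maps[rot_index][base]
--         quads.append(q)
--     return quads
-- ===== SOURCE B (Python) =====
-- def quads_from_dna_rotating(dna, map_period, map_seed):
--     # Walk the string in runs that end at a rotation-counter wrap point:
--     # within a run the rotation counter r, r+1, ... never wraps modulo period,
--     # so the whole run is decoded by index arithmetic on the slice, with no
--     # per-character modulo-by-period and no lookup tables at all.
--     period = max(1, map_period)
--     n = len(dna)
--     out = []
--     i = 0
--     r = map_seed % period
--     while i < n:
--         run = min(n - i, period - r)
--         for k, base in enumerate(dna[i:i + run]):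
--             out.append(("ACGT".index(base) - r - k) % 4)
--         i += run
--         r = (r + run) % period
--     return out
-- ===== Notes on version B (the rewrite author's own statement) =====
-- stated objective: alternative
-- what changed: Replaces A's precomputed rotating reverse-lookup dicts and per-character double modulo by a run-based walk: the string is split into wrap-free runs of the rotation counter (run = min(remaining, period - r)), and each run slice is decoded purely by index arithmetic (("ACGT".index(base) - r - k) % 4), with the counter reduced once per run instead of once per character.
import Mathlib
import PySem

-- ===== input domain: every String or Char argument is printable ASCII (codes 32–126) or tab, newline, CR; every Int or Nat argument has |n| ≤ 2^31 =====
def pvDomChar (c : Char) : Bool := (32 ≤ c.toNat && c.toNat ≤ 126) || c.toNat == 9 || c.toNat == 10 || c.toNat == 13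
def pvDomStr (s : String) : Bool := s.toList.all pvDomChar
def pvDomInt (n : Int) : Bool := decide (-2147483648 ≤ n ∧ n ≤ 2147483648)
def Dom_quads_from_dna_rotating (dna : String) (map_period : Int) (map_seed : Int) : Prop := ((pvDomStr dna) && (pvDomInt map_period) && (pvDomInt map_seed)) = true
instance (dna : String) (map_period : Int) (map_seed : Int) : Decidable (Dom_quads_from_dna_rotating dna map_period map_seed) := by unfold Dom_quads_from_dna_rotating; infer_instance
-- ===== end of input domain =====

-- B replaces A's precomputed rotating reverse-lookup tables and per-character double modulo
-- by a run-based walk: the string is processed in wrap-free runs of the rotation counter,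
-- each run decoded by index arithmetic on the slice (objective: alternative).

-- ===== PORT A =====
def pvRotTable : List (List Char) :=
  [['A', 'C', 'G', 'T'], ['C', 'G', 'T', 'A'], ['G', 'T', 'A', 'C'], ['T', 'A', 'C', 'G']]

def quads_from_dna_rotating (dna : String) (map_period : Int) (map_seed : Int) : List Int :=
  let rev_maps : List (PySem.Dict Char Int) :=
    pvRotTable.foldl (fun acc m =>
      let rev := (PySem.List.pyRange 0 4 1).foldl
        (fun rev d => rev.insert (PySem.List.pyGetD m d ' ') d) PySem.Dict.empty
      acc ++ [rev]) []
  let period := max 1 map_period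
  let quads := (PySem.List.enumerate dna.toList).foldl (fun quads p =>
      let rot_index := PySem.Int.mod (map_seed + p.1) period
      let rot_index := PySem.Int.mod rot_index 4
      -- rev_maps[rot_index][base]; none (= KeyError for a base outside ACGT) cannot
      -- occur under Pre_, and 0 ≤ rot_index < 4 so the list index is always in range
      quads ++ [(((PySem.List.pyGet? rev_maps rot_index).bind
                    (fun rev => rev.get? p.2)).getD 0)]) []
  quads

-- ===== PORT B =====
-- "ACGT".index(base): none = ValueError, excluded by Pre_
def pvIdx (c : Char) : Int := ((PySem.List.index? (['A', 'C', 'G', 'T'] : List Char) c).getD 0 : Nat)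

-- the while loop of Source B; `rest` is the unprocessed suffix dna[i:], fuel = |dna| makes the
-- recursion total (under the loop invariant 0 ≤ r < period each step consumes ≥ 1 character,
-- so the fuel never runs out on the initial call)
def pvBLoop : Nat → List Char → Int → Int → List Int
  | 0, _, _, _ => []
  | fuel + 1, rest, r, period =>
    match rest with
    | [] => []
    | c :: cs =>
      let run := min (PySem.List.len (c :: cs)) (period - r)
      ((PySem.List.enumerate (PySem.List.slice (c :: cs) (some 0) (some run)) 0).map
        (fun p => PySem.Int.mod (pvIdx p.2 - r - p.1) 4))
      ++ pvBLoop fuel ((c :: cs).drop run.toNat) (PySem.Int.mod (r + run) period) period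

def quads_from_dna_rotating_alt (dna : String) (map_period : Int) (map_seed : Int) : List Int :=
  let period := max 1 map_period
  pvBLoop dna.toList.length dna.toList (PySem.Int.mod map_seed period) period

-- ===== PRECONDITION & SPEC =====
-- Pre_ excludes exactly the inputs where A raises KeyError: a character of dna not in ACGT.
def Pre_quads_from_dna_rotating (dna : String) (map_period : Int) (map_seed : Int) : Prop :=
  (dna.toList.all (fun c => c == 'A' || c == 'C' || c == 'G' || c == 'T')) = true
instance (dna : String) (map_period : Int) (map_seed : Int) : Decidable (Pre_quads_from_dna_rotating dna map_period map_seed) := by unfold Pre_quads_from_dna_rotating; infer_instance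

def pvWitness_quads_from_dna_rotating : String × Int × Int := ("GATTACA", 5, 2)

def Spec_quads_from_dna_rotating (dna : String) (map_period : Int) (map_seed : Int) (out : List Int) : Prop := out = quads_from_dna_rotating_alt dna map_period map_seed
instance (dna : String) (map_period : Int) (map_seed : Int) (out : List Int) : Decidable (Spec_quads_from_dna_rotating dna map_period map_seed out) := by unfold Spec_quads_from_dna_rotating; infer_instance

-- ===== CLAIM (what is proved, stated in full; the proofs are below) =====
def Claim_equal_quads_from_dna_rotating : Prop := ∀ (dna : String) (map_period : Int) (map_seed : Int), Dom_quads_from_dna_rotating dna map_period map_seed → Pre_quads_from_dna_rotating dna map_period map_seed → Spec_quads_from_dna_rotating dna map_period map_seed (quads_from_dna_rotating dna map_period map_seed)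

-- ===== LEMMAS AND PROOFS =====

-- common reference semantics: decode character by character, carrying the reduced rotation
-- counter r ∈ [0, period)
def pvSpecRun (period : Int) : List Char → Int → List Int
  | [], _ => []
  | c :: cs, r =>
    PySem.Int.mod (pvIdx c - PySem.Int.mod r 4) 4 :: pvSpecRun period cs (PySem.Int.mod (r + 1) period)

-- second component of an enumerate element is an element of the list
lemma snd_mem_of_mem_enumerate {α : Type} : ∀ (l : List α) (s : Int) (p : Int × α),
    p ∈ PySem.List.enumerate l s → p.2 ∈ l := by
  intro l
  induction l with
  | nil => intro s p h; simp [PySem.List.enumerate_nil] at h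
  | cons x xs ih =>
    intro s p h
    rw [PySem.List.enumerate_cons] at h
    rcases List.mem_cons.mp h with h | h
    · subst h; exact List.mem_cons_self
    · exact List.mem_cons_of_mem _ (ih _ _ h)

-- the reverse tables A builds, after turning its append-fold into a map
def pvRevMaps : List (PySem.Dict Char Int) :=
  List.foldl
    (fun acc m => acc ++ [List.foldl (fun rev d => rev.insert (PySem.List.pyGetD m d ' ') d)
      PySem.Dict.empty (PySem.List.pyRange 0 4 1)]) [] pvRotTable

-- pointwise fact about A: table lookup = (index in ACGT − rotation) mod 4
lemma lookup_eq_closed_form (base : Char) (hb : base ∈ (['A', 'C', 'G', 'T'] : List Char))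
    (r : Int) (hr0 : 0 ≤ r) (hr4 : r < 4) :
    (((PySem.List.pyGet? pvRevMaps r).bind (fun rev => rev.get? base)).getD 0)
      = PySem.Int.mod (pvIdx base - r) 4 := by
  interval_cases r <;> (fin_cases hb <;> decide)

-- Python mod facts, over a positive modulus
lemma pvMod_absorb4 (x y : Int) :
    PySem.Int.mod (x - PySem.Int.mod y 4) 4 = PySem.Int.mod (x - y) 4 := by
  simp only [PySem.Int.mod_eq_emod_of_pos (show (0 : Int) < 4 by norm_num)]
  conv_rhs => rw [Int.sub_emod]
  rw [Int.sub_emod x (y % 4), Int.emod_emod_of_dvd _ dvd_rfl]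

lemma pvMod_small (r period : Int) (h0 : 0 ≤ r) (h : r < period) :
    PySem.Int.mod r period = r := by
  rw [PySem.Int.mod_eq_emod_of_pos (show (0 : Int) < period by omega), Int.emod_eq_of_lt h0 h]

lemma pvMod_add_left (a k period : Int) (hp : 0 < period) :
    PySem.Int.mod (PySem.Int.mod a period + k) period = PySem.Int.mod (a + k) period := by
  simp only [PySem.Int.mod_eq_emod_of_pos hp]
  exact Int.emod_add_emod a period k

-- shifting the start of enumerate under a map
lemma map_enumerate_shift {α β : Type} (g : Int × α → β) :
    ∀ (xs : List α) (s t : Int),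
    (PySem.List.enumerate xs (s + t)).map g
      = (PySem.List.enumerate xs t).map (fun p => g (s + p.1, p.2)) := by
  intro xs
  induction xs with
  | nil => intro s t; simp [PySem.List.enumerate_nil]
  | cons x xs ih =>
    intro s t
    rw [PySem.List.enumerate_cons, PySem.List.enumerate_cons]
    simp only [List.map_cons]
    rw [show s + t + 1 = s + (t + 1) by ring, ih]

-- A's per-character formula, mapped over enumerate from any start, is pvSpecRun
lemma A_norm (period : Int) (hp : 0 < period) : ∀ (xs : List Char) (s start : Int),
    (∀ c ∈ xs, c ∈ (['A', 'C', 'G', 'T'] : List Char)) →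
    (PySem.List.enumerate xs start).map
      (fun p => PySem.Int.mod (pvIdx p.2 - PySem.Int.mod (PySem.Int.mod (s + p.1) period) 4) 4)
      = pvSpecRun period xs (PySem.Int.mod (s + start) period) := by
  intro xs
  induction xs with
  | nil => intro s start _; simp [PySem.List.enumerate_nil, pvSpecRun]
  | cons c cs ih =>
    intro s start hall
    rw [PySem.List.enumerate_cons]
    simp only [List.map_cons, pvSpecRun]
    rw [ih s (start + 1) (fun c hc => hall c (List.mem_cons_of_mem _ hc)),
        pvMod_add_left _ 1 _ hp, show s + (start + 1) = s + start + 1 by ring]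

-- a run with no counter wrap, prefixed to anything, unrolls pvSpecRun
lemma pvSpecRun_chunk (period : Int) (_hp : 0 < period) :
    ∀ (chunk tail : List Char) (r : Int), 0 ≤ r → r < period →
    r + chunk.length ≤ period →
    pvSpecRun period (chunk ++ tail) r
      = (PySem.List.enumerate chunk 0).map (fun p => PySem.Int.mod (pvIdx p.2 - r - p.1) 4)
        ++ pvSpecRun period tail (PySem.Int.mod (r + chunk.length) period) := by
  intro chunk
  induction chunk with
  | nil =>
    intro tail r h0 hlt _
    simp [PySem.List.enumerate_nil, pvMod_small r period h0 hlt]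
  | cons c cs ih =>
    intro tail r h0 hlt hle
    simp only [List.length_cons] at hle
    push_cast at hle
    simp only [List.cons_append, pvSpecRun, PySem.List.enumerate_cons, List.map_cons,
      List.cons_append, List.length_cons]
    congr 1
    · rw [pvMod_absorb4, sub_zero]
    · by_cases hcase : r + 1 < period
      · rw [pvMod_small (r + 1) period (by omega) hcase,
            ih tail (r + 1) (by omega) hcase (by omega)]
        congr 1
        · rw [show (0 : Int) + 1 = 1 + 0 by ring, map_enumerate_shift]
          apply List.map_congr_left; intro p _
          congr 1; ring
        · congr 2; push_cast; ring
      · have hcs' : cs = [] := List.length_eq_zero_iff.mp (by omega)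
        subst hcs'
        simp [PySem.List.enumerate_nil]

-- a nonneg Int slice-to is take
lemma slice_to_toNat {α : Type} (xs : List α) (b : Int) (hb : 0 ≤ b) :
    PySem.List.slice xs (some 0) (some b) = xs.take b.toNat := by
  rw [show b = ((b.toNat : Nat) : Int) by omega, PySem.List.slice_zero_start,
      PySem.List.slice_to_natCast, Int.toNat_natCast]

-- the fueled while loop computes pvSpecRun
lemma pvBLoop_eq (period : Int) (hp : 0 < period) :
    ∀ (fuel : Nat) (rest : List Char) (r : Int), 0 ≤ r → r < period →
    rest.length ≤ fuel →
    pvBLoop fuel rest r period = pvSpecRun period rest r := by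
  intro fuel
  induction fuel with
  | zero =>
    intro rest r _ _ hlen
    have : rest = [] := List.length_eq_zero_iff.mp (Nat.le_zero.mp hlen)
    subst this; simp [pvBLoop, pvSpecRun]
  | succ fuel ih =>
    intro rest r h0 hlt hlen
    match rest with
    | [] => simp [pvBLoop, pvSpecRun]
    | c :: cs =>
      simp only [pvBLoop]
      set run : Int := min (PySem.List.len (c :: cs)) (period - r) with hrun
      have hlen' : PySem.List.len (c :: cs) = ((c :: cs).length : Int) := by
        simp [PySem.List.len_eq]
      have hrun1 : 1 ≤ run := by
        rw [hrun, hlen']; simp only [List.length_cons]; push_cast; omega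
      have hrunle : run ≤ ((c :: cs).length : Int) := by rw [hrun, hlen']; omega
      have hrunp : r + run ≤ period := by rw [hrun]; omega
      rw [slice_to_toNat _ run (by omega)]
      have htake : ((c :: cs).take run.toNat).length = run.toNat := by
        rw [List.length_take]; omega
      have hsplit : c :: cs = (c :: cs).take run.toNat ++ (c :: cs).drop run.toNat :=
        (List.take_append_drop _ _).symm
      conv_rhs => rw [hsplit]
      rw [pvSpecRun_chunk period hp _ _ r h0 hlt (by rw [htake]; omega)]
      congr 1
      rw [ih _ (PySem.Int.mod (r + run) period)
            (PySem.Int.mod_nonneg _ hp) (PySem.Int.mod_lt _ hp)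
            (by rw [List.length_drop]; omega)]
      congr 2
      rw [htake]; omega

theorem quads_from_dna_rotating_spec : Claim_equal_quads_from_dna_rotating := by
  intro dna map_period map_seed _hdom hpre
  unfold Spec_quads_from_dna_rotating quads_from_dna_rotating quads_from_dna_rotating_alt
  dsimp only
  have hp : (0 : Int) < max 1 map_period := by omega
  rw [PySem.List.foldl_append_singleton_eq_map, List.nil_append,
      show (List.foldl
        (fun acc m => acc ++ [List.foldl (fun rev d => rev.insert (PySem.List.pyGetD m d ' ') d)
          PySem.Dict.empty (PySem.List.pyRange 0 4 1)]) [] pvRotTable) = pvRevMaps from rfl]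
  have hall : ∀ c ∈ dna.toList, c ∈ (['A', 'C', 'G', 'T'] : List Char) := by
    intro c hc
    have h := List.all_eq_true.mp hpre _ hc
    simp only [Bool.or_eq_true, beq_iff_eq] at h
    simp only [List.mem_cons, List.not_mem_nil, or_false]
    tauto
  have hstep : (PySem.List.enumerate dna.toList).map
      (fun p => (((PySem.List.pyGet? pvRevMaps
          (PySem.Int.mod (PySem.Int.mod (map_seed + p.1) (max 1 map_period)) 4)).bind
            (fun rev => rev.get? p.2)).getD 0))
      = (PySem.List.enumerate dna.toList 0).map
      (fun p => PySem.Int.mod (pvIdx p.2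
          - PySem.Int.mod (PySem.Int.mod (map_seed + p.1) (max 1 map_period)) 4) 4) := by
    apply List.map_congr_left
    intro p hp'
    exact lookup_eq_closed_form p.2 (hall _ (snd_mem_of_mem_enumerate _ _ _ hp')) _
      (PySem.Int.mod_nonneg _ (by norm_num))
      (PySem.Int.mod_lt _ (by norm_num))
  rw [hstep, A_norm (max 1 map_period) hp dna.toList map_seed 0 hall,
      pvBLoop_eq (max 1 map_period) hp dna.toList.length dna.toList
        (PySem.Int.mod map_seed (max 1 map_period))
        (PySem.Int.mod_nonneg _ hp) (PySem.Int.mod_lt _ hp) le_rfl]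
  rw [show map_seed + 0 = map_seed by ring]
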